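-- pv_equiv track=rewrite | github.com/cafaray/atco.de-fights | couldBeAnagram_final.py | couldBeAnagram
-- ===== SOURCE A (Python) =====
-- from collections import Counter
--
-- def couldBeAnagram(s1, s2):
--     if Counter(s1) == Counter(s2): return True
--     comodines = Counter(s1) - Counter(s2)
--     diferencias = Counter(s2) - Counter(s1)
--     d = 0
--     for x,v in diferencias.items():
--         d+=v
--     return d==comodines['?']
-- ===== SOURCE B (Python) =====
-- def couldBeAnagram(s1, s2):
--     a = sorted(s1)
--     b = sorted(s2)
--     i = j = 0
--     needed = 0
--     wild = 0
--     while i < len(a) and j < len(b):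
--         if a[i] == b[j]:
--             i += 1
--             j += 1
--         elif a[i] < b[j]:
--             if a[i] == '?':
--                 wild += 1
--             i += 1
--         else:
--             needed += 1
--             j += 1
--     while i < len(a):
--         if a[i] == '?':
--             wild += 1
--         i += 1
--     needed += len(b) - j
--     return needed == wild
-- ===== Notes on version B (the rewrite author's own statement) =====
-- stated objective: alternative
-- what changed: Replaces Counter equality/subtraction arithmetic with sorting both strings and a two-pointer merge that tallies s2's surplus characters (needed) and s1's surplus '?' wildcards (wild), returning needed == wild.
import Mathlib
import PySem

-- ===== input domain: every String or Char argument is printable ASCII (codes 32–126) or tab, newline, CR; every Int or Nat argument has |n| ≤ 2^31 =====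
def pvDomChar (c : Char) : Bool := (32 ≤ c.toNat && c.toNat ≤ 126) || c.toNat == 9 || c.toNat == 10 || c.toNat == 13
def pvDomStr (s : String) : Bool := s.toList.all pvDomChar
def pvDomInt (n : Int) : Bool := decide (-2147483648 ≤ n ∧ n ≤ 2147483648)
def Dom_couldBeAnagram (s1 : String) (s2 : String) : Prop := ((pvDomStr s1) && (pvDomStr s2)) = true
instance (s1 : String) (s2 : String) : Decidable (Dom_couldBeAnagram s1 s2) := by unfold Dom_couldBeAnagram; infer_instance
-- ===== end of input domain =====

-- B replaces A's Counter arithmetic by a sort-and-merge two-pointer scan (alternative decomposition, same result).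


-- ===== PORT A =====
-- Python 'Counter(x) == Counter(y)': dict equality ignores insertion order; exact here because
-- counters of strings store exactly the keys with positive counts.
def pyCounterEq (a b : PySem.Dict Char Int) : Bool :=
  a.items.all (fun kv => b.getD kv.1 0 == kv.2) && b.items.all (fun kv => a.getD kv.1 0 == kv.2)

-- Python 'Counter(x) - Counter(y)': keeps the left counter's keys whose difference is positive,
-- in the left counter's order; exact for counters of strings (all counts positive).
def pyCounterSub (a b : PySem.Dict Char Int) : PySem.Dict Char Int :=
  PySem.Dict.mk (a.items.filterMap (fun kv =>
    let d := kv.2 - b.getD kv.1 0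
    if 0 < d then some (kv.1, d) else none))

def couldBeAnagram (s1 : String) (s2 : String) : Bool :=
  if pyCounterEq (PySem.Dict.counter s1.toList) (PySem.Dict.counter s2.toList) then true
  else
    let comodines := pyCounterSub (PySem.Dict.counter s1.toList) (PySem.Dict.counter s2.toList)
    let diferencias := pyCounterSub (PySem.Dict.counter s2.toList) (PySem.Dict.counter s1.toList)
    let d := diferencias.items.foldl (fun acc kv => acc + kv.2) 0
    d == comodines.getD '?' 0

-- ===== PORT B =====
-- the trailing 'while i < len(a)' loop of Source B
def mergeTailWild : List Char → Int → Int
  | [], w => w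
  | x :: a, w => mergeTailWild a (if x = '?' then w + 1 else w)

-- the main 'while i < len(a) and j < len(b)' loop of Source B, followed by the two tail steps
def mergeGo : List Char → List Char → Int → Int → Int × Int
  | [], b, n, w => (n + b.length, w)
  | x :: a, [], n, w => (n, mergeTailWild (x :: a) w)
  | x :: a, y :: b, n, w =>
    if x = y then mergeGo a b n w
    else if x < y then mergeGo a (y :: b) n (if x = '?' then w + 1 else w)
    else mergeGo (x :: a) b (n + 1) w
termination_by a b => a.length + b.length
decreasing_by all_goals (simp; try omega)

def couldBeAnagram_alt (s1 : String) (s2 : String) : Bool :=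
  let a := PySem.List.sorted s1.toList (fun c => c) false
  let b := PySem.List.sorted s2.toList (fun c => c) false
  let nw := mergeGo a b 0 0
  nw.1 == nw.2

-- ===== PRECONDITION & SPEC =====
def Spec_couldBeAnagram (s1 : String) (s2 : String) (out : Bool) : Prop := out = couldBeAnagram_alt s1 s2
instance (s1 : String) (s2 : String) (out : Bool) : Decidable (Spec_couldBeAnagram s1 s2 out) := by unfold Spec_couldBeAnagram; infer_instance

-- ===== CLAIM (what is proved, stated in full; the proofs are below) =====
def Claim_equal_couldBeAnagram : Prop := ∀ (s1 : String) (s2 : String), Dom_couldBeAnagram s1 s2 → Spec_couldBeAnagram s1 s2 (couldBeAnagram s1 s2)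

-- ===== LEMMAS AND PROOFS =====

-- common mathematical value of both programs
def anaSpec (l1 l2 : List Char) : Bool :=
  decide (((l2 : Multiset Char) - (l1 : Multiset Char)).card
            = ((l1 : Multiset Char) - (l2 : Multiset Char)).count '?')

lemma sub_cons_of_notMem {y : Char} {s t : Multiset Char} (h : y ∉ t) :
    (y ::ₘ s) - t = y ::ₘ (s - t) := by
  rw [Multiset.ext]
  intro z
  by_cases hz : z = y
  · subst hz
    simp [Multiset.count_sub, Multiset.count_eq_zero.2 h]
  · simp [Multiset.count_sub, hz]

lemma mergeTailWild_eq (a : List Char) (w : Int) :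
    mergeTailWild a w = w + (a.count '?' : Int) := by
  induction a generalizing w with
  | nil => simp [mergeTailWild]
  | cons x a ih =>
    by_cases hx : x = '?'
    · subst hx; simp [mergeTailWild, ih]; ring
    · simp [mergeTailWild, hx, ih]

lemma mergeGo_eq (a b : List Char) (ha : a.Pairwise (· ≤ ·)) (hb : b.Pairwise (· ≤ ·))
    (n w : Int) :
    mergeGo a b n w =
      (n + (((b : Multiset Char) - (a : Multiset Char)).card : Int),
       w + ((((a : Multiset Char) - (b : Multiset Char)).count '?' : Nat) : Int)) := by
  induction a, b, n, w using mergeGo.induct with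
  | case1 b n w =>
    simp [mergeGo]
  | case2 x a n w =>
    simp [mergeGo, mergeTailWild_eq, Multiset.coe_count]
  | case3 a y b n w ih =>
    rw [mergeGo]
    rw [ih ha.tail hb.tail]
    have h1 : ((y :: b : List Char) : Multiset Char) - ((y :: a : List Char) : Multiset Char)
        = (b : Multiset Char) - (a : Multiset Char) := by
      rw [← Multiset.cons_coe y a, Multiset.sub_cons, ← Multiset.cons_coe y b,
        Multiset.erase_cons_head]
    have h2 : ((y :: a : List Char) : Multiset Char) - ((y :: b : List Char) : Multiset Char)
        = (a : Multiset Char) - (b : Multiset Char) := by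
      rw [← Multiset.cons_coe y b, Multiset.sub_cons, ← Multiset.cons_coe y a,
        Multiset.erase_cons_head]
    simp [h1, h2]
  | case4 x a y b n w hxy hlt ih =>
    have hxnot : x ∉ (y :: b) := by
      intro hmem
      rcases List.mem_cons.1 hmem with h | h
      · exact hxy h
      · exact absurd ((List.pairwise_cons.1 hb).1 x h) (not_le.2 hlt)
    rw [mergeGo]
    rw [if_neg hxy, if_pos hlt]
    simp only [dite_eq_ite] at ih
    rw [ih ha.tail hb]
    have hc : ((y :: b : List Char) : Multiset Char) - ((x :: a : List Char) : Multiset Char)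
        = ((y :: b : List Char) : Multiset Char) - (a : Multiset Char) := by
      rw [← Multiset.cons_coe x a, Multiset.sub_cons,
        Multiset.erase_of_notMem (by simpa using hxnot)]
    simp only [Prod.mk.injEq]
    refine ⟨by rw [hc], ?_⟩
    by_cases hx : x = '?'
    · subst hx
      have hq : Multiset.count '?' ((y :: b : List Char) : Multiset Char) = 0 :=
        Multiset.count_eq_zero.2 (by simpa using hxnot)
    
      rw [if_pos rfl, ← Multiset.cons_coe '?' a, Multiset.count_sub, Multiset.count_sub, hq,
        Multiset.count_cons_self]
      simp only [Nat.sub_zero]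
      push_cast
      ring
    · rw [if_neg hx, ← Multiset.cons_coe x a, Multiset.count_sub, Multiset.count_sub,
        Multiset.count_cons_of_ne (fun h => hx h.symm)]
  | case5 x a y b n w hxy hlt ih =>
    have hyx : y < x := by
      rcases lt_trichotomy x y with h | h | h
      · exact absurd h hlt
      · exact absurd h hxy
      · exact h
    have hynot : y ∉ (x :: a) := by
      intro hmem
      rcases List.mem_cons.1 hmem with h | h
      · subst h; exact lt_irrefl _ hyx
      · exact absurd ((List.pairwise_cons.1 ha).1 y h) (not_le.2 hyx)
    rw [mergeGo]
    rw [if_neg hxy, if_neg hlt]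
    rw [ih ha hb.tail]
    have hc : ((y :: b : List Char) : Multiset Char) - ((x :: a : List Char) : Multiset Char)
        = y ::ₘ ((b : Multiset Char) - ((x :: a : List Char) : Multiset Char)) := by
      rw [← Multiset.cons_coe y b]
      exact sub_cons_of_notMem (by simpa using hynot)
    simp only [Prod.mk.injEq]
    constructor
    · rw [hc, Multiset.card_cons]
      push_cast
      ring
    · by_cases hy : y = '?'
      · subst hy
        have hq0 : Multiset.count '?' ((x :: a : List Char) : Multiset Char) = 0 :=
          Multiset.count_eq_zero.2 (by simpa using hynot)
        rw [Multiset.count_sub, Multiset.count_sub, hq0]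
        simp
      · rw [Multiset.count_sub, Multiset.count_sub, ← Multiset.cons_coe y b,
          Multiset.count_cons_of_ne (fun h => hy h.symm)]

lemma beq_cast_eq_decide (x y : Nat) : (((x : Int)) == ((y : Int))) = decide (x = y) := by
  by_cases h : x = y
  · subst h; simp
  · have hne : (x : Int) ≠ (y : Int) := by exact_mod_cast h
    simp [h, hne]

lemma alt_eq_anaSpec (s1 s2 : String) :
    couldBeAnagram_alt s1 s2 = anaSpec s1.toList s2.toList := by
  have p1 : ((PySem.List.sorted s1.toList (fun c => c) false : List Char) : Multiset Char)
      = (s1.toList : Multiset Char) := Quot.sound (PySem.List.sorted_perm _ _ _)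
  have p2 : ((PySem.List.sorted s2.toList (fun c => c) false : List Char) : Multiset Char)
      = (s2.toList : Multiset Char) := Quot.sound (PySem.List.sorted_perm _ _ _)
  show ((mergeGo (PySem.List.sorted s1.toList (fun c => c) false)
          (PySem.List.sorted s2.toList (fun c => c) false) 0 0).1
      == (mergeGo (PySem.List.sorted s1.toList (fun c => c) false)
          (PySem.List.sorted s2.toList (fun c => c) false) 0 0).2)
      = anaSpec s1.toList s2.toList
  rw [mergeGo_eq _ _ (PySem.List.sorted_pairwise _ _) (PySem.List.sorted_pairwise _ _), p1, p2]
  simp only [zero_add]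
  exact beq_cast_eq_decide _ _

-- ---- A side ----

lemma foldl_add_snd (l : List (Char × Int)) (acc : Int) :
    l.foldl (fun acc kv => acc + kv.2) acc = acc + (l.map (·.2)).sum := by
  induction l generalizing acc with
  | nil => simp
  | cons kv l ih => simp [ih]; ring

lemma map_snd_filterMap_pos (ks : List Char) (f : Char → Int) :
    ((ks.filterMap (fun k => if 0 < f k then some (k, f k) else none)).map (·.2)).sum
      = (ks.map (fun k => if 0 < f k then f k else 0)).sum := by
  induction ks with
  | nil => simp
  | cons k ks ih =>
    by_cases h : 0 < f k <;> simp [h, ih]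

lemma getD_mk_filterMap (ks : List Char) (f : Char → Int) (q : Char) :
    (PySem.Dict.mk (ks.filterMap (fun k => if 0 < f k then some (k, f k) else none))).getD q 0
      = if q ∈ ks then (if 0 < f q then f q else 0) else 0 := by
  induction ks with
  | nil => simp [PySem.Dict.getD_eq_get?_getD]; rfl
  | cons k ks ih =>
    by_cases hk : 0 < f k
    · rw [List.filterMap_cons]
      simp only [if_pos hk]
      rw [PySem.Dict.getD_eq_get?_getD, PySem.Dict.get?_mk_cons]
      by_cases hq : k = q
      · subst hq
        simp [hk]
      · simp only [beq_iff_eq, if_neg hq]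
        rw [← PySem.Dict.getD_eq_get?_getD, ih]
        simp [List.mem_cons, Ne.symm hq]
    · rw [List.filterMap_cons]
      simp only [if_neg hk]
      rw [ih]
      by_cases hq : q = k
      · subst hq
        simp [hk]
      · simp [List.mem_cons, hq]

lemma sum_map_cast (l : List Char) (f : Char → Nat) :
    (((l.map f).sum : Nat) : Int) = (l.map (fun k => ((f k : Nat) : Int))).sum := by
  induction l with
  | nil => simp
  | cons x l ih => simp [ih]

-- sum of the positive surpluses of l2 over l1 = card of the multiset difference
lemma card_sub_eq_sum (l1 l2 : List Char) :
    ((l2 : Multiset Char) - (l1 : Multiset Char)).card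
      = ((PySem.Set.ofList l2).map (fun k => l2.count k - l1.count k)).sum := by
  have hnd : (PySem.Set.ofList l2).Nodup := PySem.Set.nodup_ofList l2
  have htf : (PySem.Set.ofList l2).toFinset = l2.toFinset := by
    ext x
    simp [List.mem_toFinset, PySem.Set.mem_ofList]
  have h1 : ((l2 : Multiset Char) - (l1 : Multiset Char)).card
      = ∑ a ∈ l2.toFinset, ((l2 : Multiset Char) - (l1 : Multiset Char)).count a := by
    rw [← Multiset.toFinset_sum_count_eq]
    refine Finset.sum_subset ?_ ?_
    · intro x hx
      rw [Multiset.mem_toFinset] at hx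
      rw [List.mem_toFinset]
      have := Multiset.mem_of_le (Multiset.sub_le_self _ _) hx
      simpa using this
    · intro x _ hx
      rw [Multiset.mem_toFinset] at hx
      exact Multiset.count_eq_zero.2 hx
  rw [h1, ← htf, List.sum_toFinset _ hnd]
  refine congrArg List.sum ?_
  apply List.map_congr_left
  intro k _
  rw [Multiset.count_sub, Multiset.coe_count, Multiset.coe_count]

lemma pyCounterEq_true_iff (l1 l2 : List Char) :
    pyCounterEq (PySem.Dict.counter l1) (PySem.Dict.counter l2) = true
      ↔ ∀ c : Char, l1.count c = l2.count c := by
  unfold pyCounterEq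
  rw [Bool.and_eq_true, List.all_eq_true, List.all_eq_true]
  constructor
  · rintro ⟨h1, h2⟩ c
    by_cases hc1 : c ∈ l1
    · have := h1 (c, (l1.count c : Int)) (by
        rw [PySem.Dict.items_counter]
        exact List.mem_map.2 ⟨c, (PySem.Set.mem_ofList _ _).2 hc1, rfl⟩)
      simp only [PySem.Dict.getD_counter, beq_iff_eq] at this
      exact_mod_cast this.symm
    · by_cases hc2 : c ∈ l2
      · have := h2 (c, (l2.count c : Int)) (by
          rw [PySem.Dict.items_counter]
          exact List.mem_map.2 ⟨c, (PySem.Set.mem_ofList _ _).2 hc2, rfl⟩)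
        simp only [PySem.Dict.getD_counter, beq_iff_eq] at this
        exact_mod_cast this
      · rw [List.count_eq_zero_of_not_mem hc1, List.count_eq_zero_of_not_mem hc2]
  · intro h
    constructor
    · intro kv hkv
      rw [PySem.Dict.items_counter] at hkv
      rcases List.mem_map.1 hkv with ⟨c, _, rfl⟩
      simp [PySem.Dict.getD_counter, h c]
    · intro kv hkv
      rw [PySem.Dict.items_counter] at hkv
      rcases List.mem_map.1 hkv with ⟨c, _, rfl⟩
      simp [PySem.Dict.getD_counter, h c]

lemma a_eq_anaSpec (s1 s2 : String) :
    couldBeAnagram s1 s2 = anaSpec s1.toList s2.toList := by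
  unfold couldBeAnagram anaSpec
  set l1 := s1.toList
  set l2 := s2.toList
  by_cases heq : pyCounterEq (PySem.Dict.counter l1) (PySem.Dict.counter l2) = true
  · rw [if_pos heq]
    have hcnt := (pyCounterEq_true_iff l1 l2).1 heq
    have hms : (l1 : Multiset Char) = (l2 : Multiset Char) := by
      rw [Multiset.ext]
      intro c
      simpa [Multiset.coe_count] using hcnt c
    simp [hms]
  · rw [if_neg heq]
    show (List.foldl (fun acc kv => acc + kv.2) 0
            (pyCounterSub (PySem.Dict.counter l2) (PySem.Dict.counter l1)).items
          == (pyCounterSub (PySem.Dict.counter l1) (PySem.Dict.counter l2)).getD '?' 0)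
        = decide (((l2 : Multiset Char) - (l1 : Multiset Char)).card
            = ((l1 : Multiset Char) - (l2 : Multiset Char)).count '?')
    have hdif : (pyCounterSub (PySem.Dict.counter l2) (PySem.Dict.counter l1)).items
        = (PySem.Set.ofList l2).filterMap (fun k =>
            if 0 < ((l2.count k : Int) - (l1.count k : Int)) then
              some (k, ((l2.count k : Int) - (l1.count k : Int))) else none) := by
      unfold pyCounterSub
      rw [PySem.Dict.items_counter, List.filterMap_map]
      apply List.filterMap_congr
      intro k _
      simp [PySem.Dict.getD_counter]
    have hcom : (pyCounterSub (PySem.Dict.counter l1) (PySem.Dict.counter l2))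
        = PySem.Dict.mk ((PySem.Set.ofList l1).filterMap (fun k =>
            if 0 < ((l1.count k : Int) - (l2.count k : Int)) then
              some (k, ((l1.count k : Int) - (l2.count k : Int))) else none)) := by
      unfold pyCounterSub
      apply PySem.Dict.ext
      rw [PySem.Dict.items_counter, List.filterMap_map]
      apply List.filterMap_congr
      intro k _
      simp [PySem.Dict.getD_counter]
    rw [hdif, hcom]
    rw [foldl_add_snd, zero_add, map_snd_filterMap_pos]
    rw [getD_mk_filterMap]
    have hsum : ((PySem.Set.ofList l2).map
          (fun k => if 0 < ((l2.count k : Int) - (l1.count k : Int)) then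
            ((l2.count k : Int) - (l1.count k : Int)) else 0)).sum
        = (((l2 : Multiset Char) - (l1 : Multiset Char)).card : Int) := by
      rw [card_sub_eq_sum l1 l2, sum_map_cast]
      refine (congrArg List.sum ?_).symm
      apply List.map_congr_left
      intro k _
      split_ifs with h <;> omega
    have hq : (if '?' ∈ PySem.Set.ofList l1 then
          (if 0 < ((l1.count '?' : Int) - (l2.count '?' : Int)) then
            ((l1.count '?' : Int) - (l2.count '?' : Int)) else 0) else 0)
        = ((((l1 : Multiset Char) - (l2 : Multiset Char)).count '?' : Nat) : Int) := by
      rw [Multiset.count_sub]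
      simp only [Multiset.coe_count]
      by_cases hmem : '?' ∈ l1
      · rw [if_pos ((PySem.Set.mem_ofList _ _).2 hmem)]
        split_ifs with h <;> omega
      · rw [if_neg (fun h => hmem ((PySem.Set.mem_ofList _ _).1 h))]
        rw [List.count_eq_zero_of_not_mem hmem]
        omega
    rw [hsum, hq]
    exact beq_cast_eq_decide _ _

-- ===== VERDICT (by name: the statement is the Claim_ definition above) =====
theorem couldBeAnagram_spec : Claim_equal_couldBeAnagram := by
  intro s1 s2 _
  unfold Spec_couldBeAnagram
  rw [a_eq_anaSpec, alt_eq_anaSpec]
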